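-- pv_equiv track=rewrite | github.com/Azimcan/Ex-Codes | BMMT/fft-ntt.py | katsayi_counter
-- ===== SOURCE A (Python) =====
-- q = 17
--
-- def w_mod(i, j):
-- 	return 4**(i*j)%q
--
-- def katsayi_counter(f, w, q):
-- 	F = []
-- 	for i in range(0, w):
-- 		a_n = 0
-- 		for j in range(0, w):
-- 			a_n += w_mod(i, j)*f[j]
-- 		F.append(a_n%q)
-- 	return F
-- ===== SOURCE B (Python) =====
-- q = 17
--
-- def katsayi_counter(f, w, q):
--     # 4 has multiplicative order 4 mod 17, so 4**(i*j) % 17 depends only on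
--     # (i % 4) * (j % 4) % 4: bucket f by j % 4 and compute each of the 4
--     # distinct rows once, in O(w) total.
--     if w <= 0:
--         return []
--     b0 = b1 = b2 = b3 = 0
--     for j in range(w):
--         r = j % 4
--         if r == 0:
--             b0 += f[j]
--         elif r == 1:
--             b1 += f[j]
--         elif r == 2:
--             b2 += f[j]
--         else:
--             b3 += f[j]
--     pow4 = (1, 4, 16, 13)  # 4**k % 17 for k = 0..3
--     rows = [(b0 + pow4[r] * b1 + pow4[(2 * r) % 4] * b2 + pow4[(3 * r) % 4] * b3) % q
--             for r in range(4)]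
--     return [rows[i % 4] for i in range(w)]
-- ===== Notes on version B (the rewrite author's own statement) =====
-- stated objective: faster
-- what changed: B exploits that 4 has multiplicative order 4 mod 17, so the coefficient 4**(i*j)%17 depends only on i%4 and j%4: it buckets f by j%4 in one pass, computes the 4 distinct row values once, and emits row i%4 for each i, replacing A's double loop over giant exact powers.
import Mathlib
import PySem

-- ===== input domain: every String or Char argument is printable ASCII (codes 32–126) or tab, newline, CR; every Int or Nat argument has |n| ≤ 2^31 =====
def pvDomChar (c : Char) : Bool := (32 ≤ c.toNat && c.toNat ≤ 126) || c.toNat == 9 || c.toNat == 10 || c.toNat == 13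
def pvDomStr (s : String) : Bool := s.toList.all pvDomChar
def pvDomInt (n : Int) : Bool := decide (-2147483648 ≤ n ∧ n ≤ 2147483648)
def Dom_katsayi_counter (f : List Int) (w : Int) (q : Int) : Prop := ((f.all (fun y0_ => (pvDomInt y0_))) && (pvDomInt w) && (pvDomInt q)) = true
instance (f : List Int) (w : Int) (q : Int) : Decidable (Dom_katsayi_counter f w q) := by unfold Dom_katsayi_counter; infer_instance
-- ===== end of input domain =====

-- B buckets f by j%4 and uses the period-4 cycle of 4^n mod 17 to compute each of the
-- 4 distinct output rows once (O(w)), instead of A's double loop over exact powers.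


-- ===== PORT A =====
-- module-level helper w_mod reads the module-level q = 17 (the parameter q of
-- katsayi_counter only reaches the final 'a_n % q').
def w_mod (i j : Int) : Int := PySem.Int.mod ((4 : Int) ^ (i * j).toNat) 17

def katsayi_counter (f : List Int) (w : Int) (q : Int) : List Int :=
  (PySem.List.pyRange 0 w 1).foldl (fun F i =>
    F ++ [PySem.Int.mod
      ((PySem.List.pyRange 0 w 1).foldl
        (fun a_n j => a_n + w_mod i j * PySem.List.pyGetD f j 0) 0) q]) []

-- ===== PORT B =====
def pow4 : List Int := [1, 4, 16, 13]   -- 4**k % 17 for k = 0..3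

-- one step of Source B's bucketing loop (b0,b1,b2,b3 kept as a 4-tuple)
def bucketStep (b : Int × Int × Int × Int) (j : Int) (x : Int) : Int × Int × Int × Int :=
  let r := PySem.Int.mod j 4
  if r = 0 then (b.1 + x, b.2.1, b.2.2.1, b.2.2.2)
  else if r = 1 then (b.1, b.2.1 + x, b.2.2.1, b.2.2.2)
  else if r = 2 then (b.1, b.2.1, b.2.2.1 + x, b.2.2.2)
  else (b.1, b.2.1, b.2.2.1, b.2.2.2 + x)

-- body of Source B's 'rows' comprehension, before the final % q
def dotB (b : Int × Int × Int × Int) (r : Int) : Int :=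
  b.1 + PySem.List.pyGetD pow4 r 0 * b.2.1
      + PySem.List.pyGetD pow4 (PySem.Int.mod (2 * r) 4) 0 * b.2.2.1
      + PySem.List.pyGetD pow4 (PySem.Int.mod (3 * r) 4) 0 * b.2.2.2

def rowB (q : Int) (b : Int × Int × Int × Int) (r : Int) : Int :=
  PySem.Int.mod (dotB b r) q

def katsayi_counter_alt (f : List Int) (w : Int) (q : Int) : List Int :=
  if w ≤ 0 then []
  else
    let b := (PySem.List.pyRange 0 w 1).foldl
      (fun b j => bucketStep b j (PySem.List.pyGetD f j 0)) (0, 0, 0, 0)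
    let rows := (PySem.List.pyRange 0 4 1).map (rowB q b)
    (PySem.List.pyRange 0 w 1).map (fun i => PySem.List.pyGetD rows (PySem.Int.mod i 4) 0)

-- ===== PRECONDITION & SPEC =====
-- Pre_ excludes exactly the inputs where the Python A raises: w > len(f) (IndexError
-- on f[j]) and q = 0 with w > 0 (ZeroDivisionError on a_n % q). B raises there too.
def Pre_katsayi_counter (f : List Int) (w : Int) (q : Int) : Prop :=
  w ≤ (f.length : Int) ∧ (0 < w → q ≠ 0)
instance (f : List Int) (w : Int) (q : Int) : Decidable (Pre_katsayi_counter f w q) := by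
  unfold Pre_katsayi_counter; infer_instance

def pvWitness_katsayi_counter : List Int × Int × Int := ([3, 1, 4, 1, 5], 5, 17)

def Spec_katsayi_counter (f : List Int) (w : Int) (q : Int) (out : List Int) : Prop := out = katsayi_counter_alt f w q
instance (f : List Int) (w : Int) (q : Int) (out : List Int) : Decidable (Spec_katsayi_counter f w q out) := by unfold Spec_katsayi_counter; infer_instance

-- ===== CLAIM (what is proved, stated in full; the proofs are below) =====
def Claim_equal_katsayi_counter : Prop := ∀ (f : List Int) (w : Int) (q : Int), Dom_katsayi_counter f w q → Pre_katsayi_counter f w q → Spec_katsayi_counter f w q (katsayi_counter f w q)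

-- ===== LEMMAS AND PROOFS =====

-- the powers of 4 mod 17 cycle with period 4
lemma pow4_mod17 (n : Nat) : (4 : Int) ^ n % 17 = pow4.getD (n % 4) 0 := by
  induction n using Nat.strong_induction_on with
  | _ n ih =>
    match n with
    | 0 => decide
    | 1 => decide
    | 2 => decide
    | 3 => decide
    | (m + 4) =>
      have h := ih m (by omega)
      have he : (4 : Int) ^ (m + 4) = 4 ^ m * 256 := by ring
      have hm4 : (m + 4) % 4 = m % 4 := by omega
      rw [he, Int.mul_emod, h, hm4]
      have hm : m % 4 < 4 := by omega
      interval_cases h' : (m % 4) <;> decide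

lemma w_mod_eq (i j : Int) (hi : 0 ≤ i) (hj : 0 ≤ j) :
    w_mod i j = pow4.getD ((i % 4 * (j % 4) % 4).toNat) 0 := by
  unfold w_mod
  rw [PySem.Int.mod_eq_emod_of_pos (by norm_num)]
  have hn : i * j = ((i * j).toNat : Int) :=
    (Int.toNat_of_nonneg (mul_nonneg hi hj)).symm
  rw [pow4_mod17]
  congr 1
  have hmm : i * j % 4 = i % 4 * (j % 4) % 4 := by rw [Int.mul_emod]
  omega

lemma dot_step (i j x : Int) (b : Int × Int × Int × Int) (hi : 0 ≤ i) (hj : 0 ≤ j) :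
    dotB (bucketStep b j x) (PySem.Int.mod i 4)
      = dotB b (PySem.Int.mod i 4) + w_mod i j * x := by
  rw [w_mod_eq i j hi hj]
  have h4j : PySem.Int.mod j 4 = j % 4 := PySem.Int.mod_eq_emod_of_pos (by norm_num)
  have h4i : PySem.Int.mod i 4 = i % 4 := PySem.Int.mod_eq_emod_of_pos (by norm_num)
  have hri0 : 0 ≤ i % 4 := Int.emod_nonneg i (by norm_num)
  have hri4 : i % 4 < 4 := Int.emod_lt_of_pos i (by norm_num)
  have hrj0 : 0 ≤ j % 4 := Int.emod_nonneg j (by norm_num)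
  have hrj4 : j % 4 < 4 := Int.emod_lt_of_pos j (by norm_num)
  unfold bucketStep dotB
  rw [h4i, h4j]
  interval_cases hr : (i % 4) <;> interval_cases hs : (j % 4) <;>
    simp [pow4, PySem.Int.mod, PySem.List.pyGetD, PySem.List.pyGet?, PySem.List.pyIdx?, Int.fmod] <;> ring

lemma dotB_zero (r : Int) : dotB (0, 0, 0, 0) r = 0 := by
  simp [dotB]

lemma fold_eq (i : Int) (hi : 0 ≤ i) (f : List Int) :
    ∀ (js : List Int), (∀ j ∈ js, (0:Int) ≤ j) → ∀ (a : Int) (b : Int × Int × Int × Int),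
      js.foldl (fun a_n j => a_n + w_mod i j * PySem.List.pyGetD f j 0) a
          + dotB b (PySem.Int.mod i 4)
        = a + dotB (js.foldl (fun b j => bucketStep b j (PySem.List.pyGetD f j 0)) b)
              (PySem.Int.mod i 4) := by
  intro js
  induction js with
  | nil => intro _ a b; simp
  | cons j js ih =>
    intro hpos a b
    simp only [List.foldl_cons]
    have hj : (0:Int) ≤ j := hpos j (by simp)
    have hIH := ih (fun j' hj' => hpos j' (List.mem_cons_of_mem _ hj'))
      (a + w_mod i j * PySem.List.pyGetD f j 0) (bucketStep b j (PySem.List.pyGetD f j 0))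
    have hst := dot_step i j (PySem.List.pyGetD f j 0) b hi hj
    linarith [hIH, hst]

-- ===== VERDICT (by name: the statement is the Claim_ definition above) =====
theorem katsayi_counter_spec : Claim_equal_katsayi_counter := by
  intro f w q _ _
  unfold Spec_katsayi_counter katsayi_counter katsayi_counter_alt
  by_cases hw : w ≤ 0
  · rw [if_pos hw, PySem.List.pyRange_one_eq_nil (by omega)]
    rfl
  · rw [if_neg hw]
    simp only []
    rw [PySem.List.foldl_append_singleton_eq_map]
    simp only [List.nil_append]
    apply List.map_congr_left
    intro i hi
    obtain ⟨hi0, hiw⟩ := (PySem.List.mem_pyRange_one).mp hi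
    have hjs : ∀ j ∈ PySem.List.pyRange 0 w 1, (0:Int) ≤ j :=
      fun j hj => ((PySem.List.mem_pyRange_one).mp hj).1
    have hfold := fold_eq i hi0 f (PySem.List.pyRange 0 w 1) hjs 0 (0, 0, 0, 0)
    rw [dotB_zero] at hfold
    simp only [add_zero, zero_add] at hfold
    rw [hfold]
    have hr0 : 0 ≤ PySem.Int.mod i 4 := PySem.Int.mod_nonneg i (by norm_num)
    have hr4 : PySem.Int.mod i 4 < 4 := PySem.Int.mod_lt i (by norm_num)
    have h014 : PySem.List.pyRange 0 4 1 = [0, 1, 2, 3] := by decide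
    rw [h014]
    interval_cases hr : (PySem.Int.mod i 4) <;>
      simp [PySem.List.pyGetD, PySem.List.pyGet?, PySem.List.pyIdx?, rowB]
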